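-- pv_equiv track=rewrite | github.com/totokunda/apex-studio | apps/api/src/converters/base_converter.py | _common_prefix_token_candidates
-- ===== SOURCE A (Python) =====
-- from typing import Dict, Any, Iterable, List
--
-- def _common_prefix_token_candidates(
--     keys: List[str], max_tokens: int = 8
-- ) -> List[str]:
--     """
--     Generate dotted-prefix candidates from the unanimous common token prefix of `keys`.
--
--     Example:
--       keys start with `base_model.model.blocks...` -> candidates include
--       `base_model.` and `base_model.model.`
--     """
--     if not keys:
--         return []
--     split = [k.split(".") for k in keys if k]
--     if not split:
--         return []
--     # Compute the unanimous common token prefix length.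
--     first = split[0]
--     common_len = 0
--     for i in range(min(len(first), max_tokens)):
--         tok = first[i]
--         if not tok:
--             break
--         if all(len(s) > i and s[i] == tok for s in split[1:]):
--             common_len += 1
--         else:
--             break
--     return [".".join(first[:i]) + "." for i in range(1, common_len + 1)]
-- ===== SOURCE B (Python) =====
-- from functools import reduce
--
-- def _merge_prefix(p, q):
--     out = []
--     for a, b in zip(p, q):
--         if a != b:
--             break
--         out.append(a)
--     return out
--
-- def _common_prefix_token_candidates(keys, max_tokens=8):
--     splits = [k.split(".") for k in keys if k]
--     if not splits:
--         return []
--     common = reduce(_merge_prefix, splits)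
--     prefix = []
--     for tok in common:
--         if not tok or len(prefix) >= max_tokens:
--             break
--         prefix.append(tok)
--     out = []
--     acc = ""
--     for tok in prefix:
--         acc = acc + tok + "."
--         out.append(acc)
--     return out
-- ===== Notes on version B (the rewrite author's own statement) =====
-- stated objective: alternative
-- what changed: Replaces A's per-column index loop (an all()-scan over every other key at each position) by a functools.reduce of a pairwise longest-common-token-prefix merge, then a single truncation pass (empty token / max_tokens) and a cumulative-accumulator join instead of re-joining first[:i] for each i.
import Mathlib
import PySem

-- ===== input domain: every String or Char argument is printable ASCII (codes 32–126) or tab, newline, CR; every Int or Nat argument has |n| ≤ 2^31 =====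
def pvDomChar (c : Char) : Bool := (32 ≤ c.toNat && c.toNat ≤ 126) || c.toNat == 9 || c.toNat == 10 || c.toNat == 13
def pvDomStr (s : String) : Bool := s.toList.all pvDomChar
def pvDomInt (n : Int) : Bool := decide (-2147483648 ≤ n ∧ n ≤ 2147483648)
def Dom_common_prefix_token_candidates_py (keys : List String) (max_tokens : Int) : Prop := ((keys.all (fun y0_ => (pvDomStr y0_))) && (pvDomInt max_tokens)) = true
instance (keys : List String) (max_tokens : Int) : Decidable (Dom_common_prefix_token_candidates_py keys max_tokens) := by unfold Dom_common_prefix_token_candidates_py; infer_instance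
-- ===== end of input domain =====

-- B replaces A's per-column index loop with an `all()`-scan inside by a reduce of a
-- pairwise longest-common-token-prefix merge, then truncates and joins cumulatively
-- (objective: alternative decomposition, same asymptotic cost).

-- ===== PORT A =====
-- the `for i in range(...)` loop with `break`, carried as structural recursion on i;
-- the `none` branch of `first[i]?` is unreachable (bound ≤ first.length) and only makes it total
def aLoop (rs : List (List String)) (first : List String) (bound : Nat) (i c : Nat) : Nat :=
  if _h : i < bound then
    match first[i]? with
    | none => c
    | some tok =>
      if tok = "" then c
      else if rs.all (fun s => decide (i < s.length) && (s[i]? == some tok)) then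
        aLoop rs first bound (i+1) (c+1)
      else c
  else c
termination_by bound - i

def common_prefix_token_candidates_py (keys : List String) (max_tokens : Int) : List String :=
  if keys = [] then []
  else
    -- split = [k.split(".") for k in keys if k]; Str.split? is none only for sep = ""
    let split := (keys.filter (fun k => !(k == ""))).map (fun k => (PySem.Str.split? k ".").getD [])
    match split with
    | [] => []
    | first :: rest =>
      -- range(min(len(first), max_tokens)): Int.toNat clamps a negative max_tokens to the empty range, like Python
      let bound := min first.length max_tokens.toNat
      let common_len := aLoop rest first bound 0 0
      -- [".".join(first[:i]) + "." for i in range(1, common_len + 1)]; i ≥ 1, so first[:i] = take i.toNat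
      (PySem.List.pyRange 1 ((common_len : Int) + 1) 1).map
        (fun i => PySem.Str.join "." (first.take i.toNat) ++ ".")

-- ===== PORT B =====
-- longest elementwise-equal leading sublist of two token lists (the `zip`/`break` loop of Source B)
def mergePrefix (p q : List String) : List String :=
  match p, q with
  | a :: p', b :: q' => if a = b then a :: mergePrefix p' q' else []
  | _, _ => []

-- the `for tok in common` loop: stop at an empty token or once max_tokens tokens are kept (k = len(prefix))
def bTake (common : List String) (max_tokens k : Int) : List String :=
  match common with
  | [] => []
  | tok :: rest => if tok = "" ∨ max_tokens ≤ k then [] else tok :: bTake rest max_tokens (k+1)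

-- the output loop: acc grows by `tok + "."` and each intermediate acc is emitted
def bJoin (pre : List String) (acc : String) : List String :=
  match pre with
  | [] => []
  | tok :: rest => (acc ++ tok ++ ".") :: bJoin rest (acc ++ tok ++ ".")

def common_prefix_token_candidates_py_alt (keys : List String) (max_tokens : Int) : List String :=
  let splits := (keys.filter (fun k => !(k == ""))).map (fun k => (PySem.Str.split? k ".").getD [])
  match splits with
  | [] => []
  | h :: t => bJoin (bTake (t.foldl mergePrefix h) max_tokens 0) ""

-- ===== PRECONDITION & SPEC =====
def Spec_common_prefix_token_candidates_py (keys : List String) (max_tokens : Int) (out : List String) : Prop := out = common_prefix_token_candidates_py_alt keys max_tokens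
instance (keys : List String) (max_tokens : Int) (out : List String) : Decidable (Spec_common_prefix_token_candidates_py keys max_tokens out) := by unfold Spec_common_prefix_token_candidates_py; infer_instance

-- ===== CLAIM (what is proved, stated in full; the proofs are below) =====
def Claim_equal_common_prefix_token_candidates_py : Prop := ∀ (keys : List String) (max_tokens : Int), Dom_common_prefix_token_candidates_py keys max_tokens → Spec_common_prefix_token_candidates_py keys max_tokens (common_prefix_token_candidates_py keys max_tokens)

-- ===== LEMMAS AND PROOFS =====

theorem prefix_getElem? {α : Type} {p l : List α} (h : p <+: l) {j : Nat} (hj : j < p.length) :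
    l[j]? = p[j]? := by
  obtain ⟨t, rfl⟩ := h
  rw [List.getElem?_append_left hj]

theorem mergePrefix_prefix (p q : List String) : mergePrefix p q <+: p := by
  induction p generalizing q with
  | nil => cases q <;> simp [mergePrefix]
  | cons a p' ih =>
    cases q with
    | nil => simp [mergePrefix]
    | cons b q' =>
      by_cases h : a = b
      · simpa [mergePrefix, h] using (ih q')
      · simp [mergePrefix, h]

theorem foldl_mergePrefix_prefix (rs : List (List String)) (acc : List String) :
    rs.foldl mergePrefix acc <+: acc := by
  induction rs generalizing acc with
  | nil => simp
  | cons s rs ih => exact (ih (mergePrefix acc s)).trans (mergePrefix_prefix acc s)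

theorem merge_lt_iff (p q : List String) (i : Nat) :
    i < (mergePrefix p q).length ↔ ∀ j ≤ i, ∃ x, p[j]? = some x ∧ q[j]? = some x := by
  induction p generalizing q i with
  | nil =>
    cases q with
    | nil =>
      simp only [mergePrefix, List.length_nil, Nat.not_lt_zero, false_iff]
      intro h
      obtain ⟨x, hx, -⟩ := h 0 (Nat.zero_le _)
      simp at hx
    | cons b q' =>
      simp only [mergePrefix, List.length_nil, Nat.not_lt_zero, false_iff]
      intro h
      obtain ⟨x, hx, -⟩ := h 0 (Nat.zero_le _)
      simp at hx
  | cons a p' ih =>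
    cases q with
    | nil =>
      simp only [mergePrefix, List.length_nil, Nat.not_lt_zero, false_iff]
      intro h
      obtain ⟨x, -, hx⟩ := h 0 (Nat.zero_le _)
      simp at hx
    | cons b q' =>
      by_cases hab : a = b
      · subst hab
        simp only [mergePrefix, if_true, List.length_cons]
        cases i with
        | zero =>
          simp only [Nat.zero_lt_succ, true_iff]
          intro j hj
          interval_cases j
          exact ⟨a, by simp, by simp⟩
        | succ i =>
          rw [Nat.succ_lt_succ_iff, ih q' i]
          constructor
          · intro h j hj
            cases j with
            | zero => exact ⟨a, by simp, by simp⟩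
            | succ j =>
              obtain ⟨x, h1, h2⟩ := h j (Nat.le_of_succ_le_succ hj)
              exact ⟨x, by simpa using h1, by simpa using h2⟩
          · intro h j hj
            obtain ⟨x, h1, h2⟩ := h (j+1) (Nat.succ_le_succ hj)
            exact ⟨x, by simpa using h1, by simpa using h2⟩
      · simp only [mergePrefix, if_neg hab, List.length_nil, Nat.not_lt_zero, false_iff]
        intro h
        obtain ⟨x, h1, h2⟩ := h 0 (Nat.zero_le _)
        simp at h1 h2
        exact hab (h1.trans h2.symm)

theorem merge_lt_iff' (p q : List String) (i : Nat) :
    i < (mergePrefix p q).length ↔ (i < p.length ∧ ∀ j ≤ i, q[j]? = p[j]?) := by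
  rw [merge_lt_iff]
  constructor
  · intro h
    constructor
    · obtain ⟨x, hx, -⟩ := h i le_rfl
      exact (List.getElem?_eq_some_iff.mp hx).1
    · intro j hj
      obtain ⟨x, h1, h2⟩ := h j hj
      rw [h1, h2]
  · rintro ⟨hlen, hq⟩ j hj
    have hjp : j < p.length := lt_of_le_of_lt hj hlen
    exact ⟨p[j], by simp [hjp], by rw [hq j hj]; simp [hjp]⟩

theorem foldl_lt_iff (rs : List (List String)) (acc : List String) (i : Nat) :
    i < (rs.foldl mergePrefix acc).length ↔
      (i < acc.length ∧ ∀ s ∈ rs, ∀ j ≤ i, s[j]? = acc[j]?) := by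
  induction rs generalizing acc with
  | nil => simp
  | cons s rs ih =>
    rw [List.foldl_cons, ih]
    constructor
    · rintro ⟨hm, hrest⟩
      have h' := (merge_lt_iff' acc s i).mp hm
      refine ⟨h'.1, ?_⟩
      intro t ht j hj
      rcases List.mem_cons.mp ht with rfl | ht'
      · exact h'.2 j hj
      · have := hrest t ht' j hj
        rwa [← prefix_getElem? (mergePrefix_prefix acc s) (lt_of_le_of_lt hj hm)] at this
    · rintro ⟨hlen, hall⟩
      have hm : i < (mergePrefix acc s).length :=
        (merge_lt_iff' acc s i).mpr ⟨hlen, hall s (List.mem_cons_self)⟩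
      refine ⟨hm, ?_⟩
      intro t ht j hj
      rw [← prefix_getElem? (mergePrefix_prefix acc s) (lt_of_le_of_lt hj hm)]
      exact hall t (List.mem_cons_of_mem _ ht) j hj

theorem bTake_nil (mt k : Int) : bTake [] mt k = [] := rfl

theorem bTake_prefix (l : List String) (mt k : Int) : bTake l mt k <+: l := by
  induction l generalizing k with
  | nil => simp [bTake]
  | cons t r ih =>
    by_cases h : t = "" ∨ mt ≤ k
    · simp [bTake, h]
    · simpa [bTake, h] using ih (k+1)

theorem aLoop_eq (rs : List (List String)) (first : List String) (mt : Int) :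
    ∀ d i c, (rs.foldl mergePrefix first).length - i ≤ d →
      i ≤ (rs.foldl mergePrefix first).length →
      aLoop rs first (min first.length mt.toNat) i c
        = c + (bTake ((rs.foldl mergePrefix first).drop i) mt (i : Int)).length := by
  set P := rs.foldl mergePrefix first with hP
  have hPf : P <+: first := foldl_mergePrefix_prefix rs first
  have hPlen : P.length ≤ first.length := hPf.length_le
  have hPlt : ∀ n, n < P.length ↔
      (n < first.length ∧ ∀ s ∈ rs, ∀ j ≤ n, s[j]? = first[j]?) := fun n => by
    rw [hP]; exact foldl_lt_iff rs first n
  have hPget : ∀ {n}, n < P.length → P[n]? = first[n]? := fun {n} hn =>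
    (prefix_getElem? hPf hn).symm
  intro d
  induction d with
  | zero =>
    intro i c hd hi
    have hi' : i = P.length := by omega
    subst hi'
    rw [List.drop_length, bTake_nil]
    rw [aLoop]
    split
    · next hb =>
      have hfl : P.length < first.length := by omega
      rcases hg : first[P.length]? with _ | tok
      · simp only [hg]; simp
      · simp only [hg]
        split
        · simp
        · next htok =>
          split
          · next hall =>
            exfalso
            have hcon : P.length < P.length := by
              rw [hPlt]
              refine ⟨hfl, ?_⟩
              intro s hs j hj
              rcases Nat.lt_or_ge j P.length with hjlt | hjge
              · exact ((hPlt j).mp hjlt).2 s hs j le_rfl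
              · have hj' : j = P.length := by omega
                subst hj'
                have := List.all_eq_true.mp hall s hs
                simp only [Bool.and_eq_true, decide_eq_true_eq, beq_iff_eq] at this
                rw [this.2, hg]
            exact absurd hcon (lt_irrefl _)
          · simp
    · simp
  | succ d ihd =>
    intro i c hd hi
    rw [aLoop]
    split
    · next hb =>
      have hfl : i < first.length := by omega
      have hmt : (i : Int) < mt := by omega
      rcases hg : first[i]? with _ | tok
      · exfalso; rw [List.getElem?_eq_none_iff] at hg; omega
      · have htokval : tok = first[i] := by
          rw [List.getElem?_eq_getElem hfl] at hg
          exact (Option.some_inj.mp hg).symm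
        simp only [hg]
        split
        · next htok =>
          rcases Nat.lt_or_ge i P.length with hiP | hiP
          · rw [List.drop_eq_getElem_cons hiP]
            have hPi : P[i] = first[i] := by
              have := hPget hiP
              rw [List.getElem?_eq_getElem hiP, List.getElem?_eq_getElem hfl] at this
              exact Option.some_inj.mp this
            rw [bTake, if_pos (Or.inl (by rw [hPi, ← htokval, htok]))]
            simp
          · have : i = P.length := by omega
            subst this
            rw [List.drop_length, bTake_nil]
            simp
        · next htok =>
          split
          · next hall =>
            have hiP : i < P.length := by
              rw [hPlt]
              refine ⟨hfl, ?_⟩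
              intro s hs j hj
              rcases Nat.lt_or_ge j i with hjlt | hjge
              · have hjP : j < P.length := by omega
                exact ((hPlt j).mp hjP).2 s hs j le_rfl
              · have hj' : j = i := by omega
                subst hj'
                have := List.all_eq_true.mp hall s hs
                simp only [Bool.and_eq_true, decide_eq_true_eq, beq_iff_eq] at this
                rw [this.2, hg]
            have hPi : P[i] = first[i] := by
              have := hPget hiP
              rw [List.getElem?_eq_getElem hiP, List.getElem?_eq_getElem hfl] at this
              exact Option.some_inj.mp this
            rw [List.drop_eq_getElem_cons hiP]
            rw [bTake, if_neg (by
              rintro (h1 | h2)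
              · rw [hPi, ← htokval] at h1; exact htok h1
              · omega)]
            have hrec := ihd (i+1) (c+1) (by omega) (by omega)
            rw [hrec]
            simp only [List.length_cons]
            push_cast
            omega
          · next hall =>
            have hiP : ¬ i < P.length := by
              intro hiP
              apply hall
              have hfor := (hPlt i).mp hiP
              rw [List.all_eq_true]
              intro s hs
              have hsi := hfor.2 s hs i le_rfl
              rw [hg] at hsi
              obtain ⟨hslen, hval⟩ := List.getElem?_eq_some_iff.mp hsi
              simp [hslen, hval]
            have : i = P.length := by omega
            subst this
            rw [List.drop_length, bTake_nil]
            simp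
    · next hb =>
      rcases Nat.lt_or_ge i P.length with hiP | hiP
      · have hmt : (mt : Int) ≤ i := by omega
        rw [List.drop_eq_getElem_cons hiP, bTake, if_pos (Or.inr hmt)]
        simp
      · have : i = P.length := by omega
        subst this
        rw [List.drop_length, bTake_nil]
        simp

def dotsCat : List String → String
  | [] => ""
  | t :: r => t ++ "." ++ dotsCat r

theorem bJoin_eq (l : List String) (acc : String) :
    bJoin l acc = (List.range l.length).map (fun j => acc ++ dotsCat (l.take (j+1))) := by
  induction l generalizing acc with
  | nil => simp [bJoin]
  | cons t r ih =>
    rw [bJoin, List.length_cons, List.range_succ_eq_map, List.map_cons, ih]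
    congr 1
    · show acc ++ t ++ "." = acc ++ dotsCat ((t :: r).take 1)
      simp [dotsCat, String.append_assoc, String.append_empty]
    · rw [List.map_map]
      apply List.map_congr_left
      intro j hj
      show (acc ++ t ++ ".") ++ dotsCat (r.take (j+1)) = acc ++ dotsCat ((t :: r).take (j+1+1))
      rw [List.take_succ_cons]
      show (acc ++ t ++ ".") ++ dotsCat (r.take (j+1)) = acc ++ (t ++ "." ++ dotsCat (r.take (j+1)))
      rw [String.append_assoc, String.append_assoc, String.append_assoc]

theorem join_dots (t : String) (r : List String) :
    PySem.Str.join "." (t :: r) ++ "." = dotsCat (t :: r) := by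
  induction r generalizing t with
  | nil =>
    apply String.toList_injective
    simp [PySem.Str.toList_join, PySem.Chars.join_singleton, dotsCat, String.toList_append]
  | cons q r ih =>
    apply String.toList_injective
    have hq := congrArg String.toList (ih q)
    simp only [String.toList_append, PySem.Str.toList_join, List.map_cons] at hq ⊢
    rw [PySem.Chars.join_cons_cons]
    have h2 : (dotsCat (t :: q :: r)).toList = t.toList ++ ".".toList ++ (dotsCat (q :: r)).toList := by
      simp [dotsCat, String.toList_append]
    rw [h2, ← hq]
    simp [List.append_assoc]

theorem core_eq (first : List String) (rs : List (List String)) (mt : Int) :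
    (PySem.List.pyRange 1 ((aLoop rs first (min first.length mt.toNat) 0 0 : Int) + 1) 1).map
        (fun i => PySem.Str.join "." (first.take i.toNat) ++ ".")
      = bJoin (bTake (rs.foldl mergePrefix first) mt 0) "" := by
  have hPf : rs.foldl mergePrefix first <+: first := foldl_mergePrefix_prefix rs first
  have hA : aLoop rs first (min first.length mt.toNat) 0 0
      = (bTake (rs.foldl mergePrefix first) mt 0).length := by
    have := aLoop_eq rs first mt (rs.foldl mergePrefix first).length 0 0 (by omega) (Nat.zero_le _)
    simpa using this
  set L := bTake (rs.foldl mergePrefix first) mt 0 with hL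
  have hLf : L <+: first := (bTake_prefix _ mt 0).trans hPf
  have hn : L.length ≤ first.length := hLf.length_le
  have hLtake : L = first.take L.length := List.prefix_iff_eq_take.mp hLf
  rw [hA, PySem.List.pyRange_one]
  have hcast : (((L.length : Int) + 1) - 1).toNat = L.length := by omega
  rw [hcast, List.map_map]
  conv_rhs => rw [hLtake, bJoin_eq]
  have hlen : (first.take L.length).length = L.length := by
    rw [List.length_take]; omega
  rw [hlen]
  apply List.map_congr_left
  intro j hj
  have hjn : j < L.length := List.mem_range.mp hj
  show PySem.Str.join "." (first.take ((1 + (j : Int)).toNat)) ++ "."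
      = "" ++ dotsCat ((first.take L.length).take (j+1))
  have h1 : ((1 : Int) + (j : Int)).toNat = j + 1 := by omega
  rw [h1, List.take_take, min_eq_left (by omega : j + 1 ≤ L.length), String.empty_append]
  rcases hT : first.take (j+1) with _ | ⟨t, r⟩
  · exfalso
    have hlen2 : (first.take (j+1)).length = 0 := by rw [hT]; rfl
    rw [List.length_take] at hlen2
    omega
  · exact join_dots t r

-- ===== VERDICT (by name: the statement is the Claim_ definition above) =====
theorem common_prefix_token_candidates_py_spec : Claim_equal_common_prefix_token_candidates_py := by
  intro keys mt _
  unfold Spec_common_prefix_token_candidates_py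
  unfold common_prefix_token_candidates_py common_prefix_token_candidates_py_alt
  by_cases hk : keys = []
  · subst hk; simp
  · simp only [if_neg hk]
    cases hs : (keys.filter (fun k => !(k == ""))).map (fun k => (PySem.Str.split? k ".").getD []) with
    | nil => simp
    | cons first rest => exact core_eq first rest mt
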